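-- pv_equiv track=rewrite | github.com/saketchopade/DPLL | dpll.py | find_unit_clause
-- ===== SOURCE A (Python) =====
-- def find_unit_clause(predicates):
-- 	uc = list()
-- 	for p in predicates:
-- 		if len(p) == 1:
-- 			uc.append(p[0])
-- 	for element in uc:							# If a literal and it's negation present as unit clause then unsatisfied
-- 		if str('!'+element) in uc:
-- 			return list()
--
-- 	return uc
-- ===== SOURCE B (Python) =====
-- def find_unit_clause(predicates):
-- 	uc = []
-- 	seen = set()    # unit literals seen so far
-- 	negs = set()    # their negations
-- 	for p in predicates:
-- 		if len(p) == 1: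
-- 			lit = p[0]
-- 			if ('!' + lit) in seen or lit in negs:
-- 				return []
-- 			uc.append(lit)
-- 			seen.add(lit)
-- 			negs.add('!' + lit)
-- 	return uc
-- ===== Notes on version B (the rewrite author's own statement) =====
-- stated objective: alternative
-- what changed: Single pass: conflict detection is fused into the collection loop with two sets (literals seen so far and their negations) and an early return, replacing A's build-then-rescan of the full unit list.
import Mathlib
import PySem

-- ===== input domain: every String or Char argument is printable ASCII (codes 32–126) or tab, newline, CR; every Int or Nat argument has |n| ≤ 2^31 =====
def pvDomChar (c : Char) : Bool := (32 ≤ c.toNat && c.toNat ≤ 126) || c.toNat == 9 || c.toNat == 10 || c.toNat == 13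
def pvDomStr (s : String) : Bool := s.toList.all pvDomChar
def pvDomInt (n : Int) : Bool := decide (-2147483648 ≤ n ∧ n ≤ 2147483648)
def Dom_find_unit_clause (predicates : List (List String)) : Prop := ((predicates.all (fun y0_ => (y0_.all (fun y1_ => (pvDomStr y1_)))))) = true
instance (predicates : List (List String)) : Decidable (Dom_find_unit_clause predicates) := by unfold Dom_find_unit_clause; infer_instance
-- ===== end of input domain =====

-- B fuses A's two passes into one: conflicts are detected with two sets (seen literals and
-- their negations) while collecting, instead of rescanning the full unit list afterwards.

-- ===== PORT A =====
-- first loop of A: collect p[0] of every clause of length 1, in order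
def fuc_units : List (List String) → List String
  | [] => []
  | p :: rest =>
    match p with
    | [x] => x :: fuc_units rest
    | _ => fuc_units rest

-- second loop of A: for each element of uc, if '!'+element is in uc return []
def fuc_scan (full : List String) : List String → List String
  | [] => full
  | e :: rest => if ("!" ++ e) ∈ full then [] else fuc_scan full rest

def find_unit_clause (predicates : List (List String)) : List String :=
  let uc := fuc_units predicates
  fuc_scan uc uc

-- ===== PORT B =====
-- single loop of B over predicates, carrying uc, seen and negs
def fuc_alt_loop : List (List String) → List String → PySem.Set String → PySem.Set String → List String
  | [], uc, _, _ => uc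
  | p :: rest, uc, seen, negs =>
    match p with
    | [lit] =>
      if ("!" ++ lit) ∈ seen ∨ lit ∈ negs then []
      else fuc_alt_loop rest (uc ++ [lit]) (PySem.Set.add seen lit) (PySem.Set.add negs ("!" ++ lit))
    | _ => fuc_alt_loop rest uc seen negs

def find_unit_clause_alt (predicates : List (List String)) : List String :=
  fuc_alt_loop predicates [] PySem.Set.empty PySem.Set.empty

-- ===== PRECONDITION & SPEC =====
def Spec_find_unit_clause (predicates : List (List String)) (out : List String) : Prop := out = find_unit_clause_alt predicates
instance (predicates : List (List String)) (out : List String) : Decidable (Spec_find_unit_clause predicates out) := by unfold Spec_find_unit_clause; infer_instance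

-- ===== CLAIM (what is proved, stated in full; the proofs are below) =====
def Claim_equal_find_unit_clause : Prop := ∀ (predicates : List (List String)), Dom_find_unit_clause predicates → Spec_find_unit_clause predicates (find_unit_clause predicates)

-- ===== LEMMAS AND PROOFS =====

-- a list of unit literals is conflicted when it contains some literal together with its negation
abbrev fucConf (l : List String) : Prop := ∃ e ∈ l, ("!" ++ e) ∈ l

theorem bang_ne (s : String) : "!" ++ s ≠ s := by
  intro h
  have := congrArg String.length h
  simp [String.length_append] at this

theorem fuc_scan_eq (full : List String) (l : List String) :
    fuc_scan full l = if ∃ e ∈ l, ("!" ++ e) ∈ full then [] else full := by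
  induction l with
  | nil => simp [fuc_scan]
  | cons e rest ih =>
    simp only [fuc_scan, ih]
    by_cases h : ("!" ++ e) ∈ full
    · simp [h]
    · simp [h]

theorem fuc_alt_loop_eq (preds : List (List String)) :
    ∀ (uc : List String) (seen negs : PySem.Set String),
    (∀ x, x ∈ seen ↔ x ∈ uc) →
    (∀ x, x ∈ negs ↔ x ∈ uc.map (fun y => "!" ++ y)) →
    ¬ fucConf uc →
    fuc_alt_loop preds uc seen negs =
      if fucConf (uc ++ fuc_units preds) then [] else uc ++ fuc_units preds := by
  induction preds with
  | nil =>
    intro uc seen negs _ _ hnc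
    simp [fuc_alt_loop, fuc_units, hnc]
  | cons p rest ih =>
    intro uc seen negs hseen hnegs hnc
    match p with
    | [] => simpa [fuc_alt_loop, fuc_units] using ih uc seen negs hseen hnegs hnc
    | x :: y :: t => simpa [fuc_alt_loop, fuc_units] using ih uc seen negs hseen hnegs hnc
    | [lit] =>
      simp only [fuc_alt_loop, fuc_units]
      by_cases hcf : ("!" ++ lit) ∈ seen ∨ lit ∈ negs
      · -- conflict found: A's full list is conflicted too
        have hconf : fucConf (uc ++ lit :: fuc_units rest) := by
          rcases hcf with h | h
          · exact ⟨lit, by simp, by simp [(hseen _).1 h]⟩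
          · rcases List.mem_map.1 ((hnegs _).1 h) with ⟨y, hy, hxy⟩
            exact ⟨y, by simp [hy], by simp [hxy]⟩
        simp [hcf, hconf]
      · push Not at hcf
        obtain ⟨h1, h2⟩ := hcf
        have h1' : ("!" ++ lit) ∉ uc := fun h => h1 ((hseen _).2 h)
        have h2' : ∀ y ∈ uc, lit ≠ "!" ++ y := by
          intro y hy he
          exact h2 ((hnegs _).2 (List.mem_map.2 ⟨y, hy, he.symm⟩))
        have hnc' : ¬ fucConf (uc ++ [lit]) := by
          rintro ⟨e, he, hne⟩
          rw [List.mem_append, List.mem_singleton] at he hne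
          rcases he with he | rfl
          · rcases hne with hne | hne
            · exact hnc ⟨e, he, hne⟩
            · exact h2' e he hne.symm
          · rcases hne with hne | hne
            · exact h1' hne
            · exact bang_ne e hne
        have hseen' : ∀ x, x ∈ PySem.Set.add seen lit ↔ x ∈ uc ++ [lit] := by
          intro x
          simp [PySem.Set.mem_add, hseen x, or_comm]
        have hnegs' : ∀ x, x ∈ PySem.Set.add negs ("!" ++ lit) ↔
            x ∈ (uc ++ [lit]).map (fun y => "!" ++ y) := by
          intro x
          simp [PySem.Set.mem_add, hnegs x, or_comm]
        have := ih (uc ++ [lit]) _ _ hseen' hnegs' hnc'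
        simp only [List.append_assoc, List.singleton_append] at this
        simp [h1, h2, this]

theorem find_unit_clause_eq (preds : List (List String)) :
    find_unit_clause preds =
      if fucConf (fuc_units preds) then [] else fuc_units preds := by
  simp [find_unit_clause, fuc_scan_eq]

theorem find_unit_clause_alt_eq (preds : List (List String)) :
    find_unit_clause_alt preds =
      if fucConf (fuc_units preds) then [] else fuc_units preds := by
  have := fuc_alt_loop_eq preds [] PySem.Set.empty PySem.Set.empty
    (by simp [PySem.Set.empty]) (by simp [PySem.Set.empty]) (by rintro ⟨e, he, -⟩; simp at he)
  simpa [find_unit_clause_alt] using this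

-- ===== VERDICT (by name: the statement is the Claim_ definition above) =====
theorem find_unit_clause_spec : Claim_equal_find_unit_clause := by
  intro preds _
  unfold Spec_find_unit_clause
  rw [find_unit_clause_eq, find_unit_clause_alt_eq]
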